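-- pv_equiv track=rewrite | github.com/liamarguedas/py2048 | src/game.py | sum_vector
-- ===== SOURCE A (Python) =====
-- BLANK = 0
--
-- def sum_vector(vector, reversed=False):
--     result_vector = []
--
--     value = 0
--
--     while value < len(vector):
--         if value + 1 < len(vector) and vector[value] == vector[value + 1]:
--             result_vector.append(vector[value] * 2)
--
--             value += 2
--
--         else:
--             result_vector.append(vector[value])
--
--             value += 1
--
--     available_spaces = [BLANK] * (4 - len(result_vector))
--
--     if not reversed:
--         result_vector.extend(available_spaces)
--         return result_vector
--
--     if reversed:
--         available_spaces.extend(result_vector)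
--         return available_spaces
-- ===== SOURCE B (Python) =====
-- BLANK = 0
--
-- def sum_vector(vector, reversed=False):
--     # pass 1: run-length encode consecutive equal tiles
--     runs = []
--     for tile in vector:
--         if runs and runs[-1][0] == tile:
--             runs[-1][1] += 1
--         else:
--             runs.append([tile, 1])
--     # pass 2: a run of k equal tiles v merges into k//2 doubled tiles and k%2 leftover
--     result = []
--     for value, count in runs:
--         result += [value * 2] * (count // 2) + [value] * (count % 2)
--     available_spaces = [BLANK] * (4 - len(result))
--     if not reversed:
--         return result + available_spaces
--     return available_spaces + result
-- ===== Notes on version B (the rewrite author's own statement) =====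
-- stated objective: alternative
-- what changed: Replaces A's index-skip look-ahead scan with two staged passes: a run-length encoding of consecutive equal tiles, then an arithmetic expansion of each run (v,k) into k//2 doubled tiles plus k%2 leftover, with the same 4-slot zero padding.
import Mathlib
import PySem

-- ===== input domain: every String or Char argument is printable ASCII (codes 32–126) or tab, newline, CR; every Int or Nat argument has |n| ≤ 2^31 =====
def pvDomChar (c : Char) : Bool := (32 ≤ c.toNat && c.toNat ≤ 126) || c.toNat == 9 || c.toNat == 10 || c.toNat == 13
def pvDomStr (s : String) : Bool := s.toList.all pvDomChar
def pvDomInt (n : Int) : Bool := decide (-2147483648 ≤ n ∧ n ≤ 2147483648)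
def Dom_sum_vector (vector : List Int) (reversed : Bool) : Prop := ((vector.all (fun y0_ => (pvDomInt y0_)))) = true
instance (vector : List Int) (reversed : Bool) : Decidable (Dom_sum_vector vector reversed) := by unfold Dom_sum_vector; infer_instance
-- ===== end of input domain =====

-- B replaces A's index-skip look-ahead scan by two staged passes (run-length encoding, then arithmetic expansion of each run); alternative decomposition, same cost.


-- ===== PORT A =====
-- A's while-loop: index `value` walks the vector, looking ahead at vector[value+1]
def sumVecLoopA (vector : List Int) (value : Nat) (result : List Int) : List Int :=
  if value < vector.length then
    if value + 1 < vector.length ∧ vector.getD value 0 = vector.getD (value + 1) 0 then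
      sumVecLoopA vector (value + 2) (result ++ [vector.getD value 0 * 2])
    else
      sumVecLoopA vector (value + 1) (result ++ [vector.getD value 0])
  else result
termination_by vector.length - value

def sum_vector (vector : List Int) (reversed : Bool) : List Int :=
  let result_vector := sumVecLoopA vector 0 []
  let available_spaces := List.replicate (4 - result_vector.length : Int).toNat 0
  if !reversed then result_vector ++ available_spaces
  else available_spaces ++ result_vector

-- ===== PORT B =====
-- B pass 1 step: runs kept head-first reversed so runs[-1] is the head
def runsStep (runs : List (Int × Nat)) (tile : Int) : List (Int × Nat) :=
  match runs with
  | (v, c) :: rest => if v = tile then (v, c + 1) :: rest else (tile, 1) :: (v, c) :: rest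
  | [] => [(tile, 1)]

-- B pass 2: a run (v, c) expands to c/2 doubled tiles and c%2 leftover
def expandRun (r : Int × Nat) : List Int :=
  List.replicate (r.2 / 2) (r.1 * 2) ++ List.replicate (r.2 % 2) r.1

def sum_vector_alt (vector : List Int) (reversed : Bool) : List Int :=
  let runs := (vector.foldl runsStep []).reverse
  let result := runs.foldl (fun acc r => acc ++ expandRun r) []
  let available_spaces := List.replicate (4 - result.length : Int).toNat 0
  if !reversed then result ++ available_spaces
  else available_spaces ++ result

-- ===== PRECONDITION & SPEC =====
def Spec_sum_vector (vector : List Int) (reversed : Bool) (out : List Int) : Prop := out = sum_vector_alt vector reversed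
instance (vector : List Int) (reversed : Bool) (out : List Int) : Decidable (Spec_sum_vector vector reversed out) := by unfold Spec_sum_vector; infer_instance

-- ===== CLAIM (what is proved, stated in full; the proofs are below) =====
def Claim_equal_sum_vector : Prop := ∀ (vector : List Int) (reversed : Bool), Dom_sum_vector vector reversed → Spec_sum_vector vector reversed (sum_vector vector reversed)

-- ===== LEMMAS AND PROOFS =====

-- reference merge both programs are proved equal to
def pvMerge : List Int → List Int
  | a :: b :: t => if a = b then a * 2 :: pvMerge t else a :: pvMerge (b :: t)
  | l => l

theorem sumVecLoopA_eq_merge (vector : List Int) (value : Nat) (result : List Int) :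
    sumVecLoopA vector value result = result ++ pvMerge (vector.drop value) := by
  rw [sumVecLoopA]
  split
  · rename_i h
    have hd : vector.drop value = vector[value] :: vector.drop (value + 1) :=
      List.drop_eq_getElem_cons h
    split
    · rename_i h2
      obtain ⟨h1, he⟩ := h2
      have hd2 : vector.drop (value + 1) = vector[value + 1] :: vector.drop (value + 2) :=
        List.drop_eq_getElem_cons h1
      rw [sumVecLoopA_eq_merge vector (value + 2), hd, hd2, pvMerge]
      simp [List.getD, List.getElem?_eq_getElem h, List.getElem?_eq_getElem h1] at he ⊢
      simp [he]
    · rename_i h2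
      rw [sumVecLoopA_eq_merge vector (value + 1), hd]
      rcases hcase : vector.drop (value + 1) with _ | ⟨b, t⟩
      · simp [pvMerge, List.getD, List.getElem?_eq_getElem h]
      · have h1 : value + 1 < vector.length := by
          have := congrArg List.length hcase
          simp [List.length_drop] at this
          omega
        have hb : b = vector[value + 1] := by
          rw [List.drop_eq_getElem_cons h1] at hcase
          exact (List.cons.injEq _ _ _ _ ▸ hcase).1.symm
        have hne : vector[value] ≠ vector[value + 1] := by
          intro heq
          exact h2 ⟨h1, by simp [List.getD, List.getElem?_eq_getElem h, List.getElem?_eq_getElem h1, heq]⟩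
        rw [pvMerge]
        simp [List.getD, List.getElem?_eq_getElem h, hb, hne]
  · rename_i h
    rw [List.drop_eq_nil_of_le (by omega)]
    simp [pvMerge]
termination_by vector.length - value

-- expanding a run arithmetically is what pvMerge does to a block of equal tiles
theorem pvMerge_replicate (n : Nat) (v : Int) (l : List Int) (h : ∀ x ∈ l.head?, x ≠ v) :
    pvMerge (List.replicate n v ++ l) =
      List.replicate (n / 2) (v * 2) ++ List.replicate (n % 2) v ++ pvMerge l := by
  match n with
  | 0 => simp
  | 1 =>
    cases l with
    | nil => simp [pvMerge]
    | cons b t =>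
      have hb : b ≠ v := h b (by simp)
      show pvMerge (v :: b :: t) = _
      rw [pvMerge, if_neg (fun he : v = b => hb he.symm)]
      simp
  | n + 2 =>
    have : List.replicate (n + 2) v ++ l = v :: v :: (List.replicate n v ++ l) := by
      simp [List.replicate_succ]
    rw [this, pvMerge, if_pos rfl, pvMerge_replicate n v l h]
    have h2 : (n + 2) / 2 = n / 2 + 1 := by omega
    have h3 : (n + 2) % 2 = n % 2 := by omega
    simp [h2, h3, List.replicate_succ]

def expandAll (runs : List (Int × Nat)) : List Int := runs.reverse.flatMap expandRun

theorem foldl_runsStep_merge (l : List Int) (v : Int) (c : Nat) (rs : List (Int × Nat)) :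
    expandAll (l.foldl runsStep ((v, c + 1) :: rs)) =
      expandAll rs ++ pvMerge (List.replicate (c + 1) v ++ l) := by
  induction l generalizing v c rs with
  | nil =>
    simp only [List.foldl_nil, expandAll, List.reverse_cons, List.flatMap_append]
    rw [pvMerge_replicate (c + 1) v [] (by simp)]
    simp [expandRun, pvMerge]
  | cons x t ih =>
    by_cases hvx : v = x
    · simp only [List.foldl_cons, runsStep, if_pos hvx]
      rw [ih v (c + 1) rs]
      have : List.replicate (c + 1) v ++ x :: t = List.replicate (c + 1 + 1) v ++ t := by
        subst hvx
        rw [List.replicate_succ' (n := c + 1), List.append_assoc]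
        rfl
      rw [this]
    · simp only [List.foldl_cons, runsStep, if_neg hvx]
      rw [ih x 0 ((v, c + 1) :: rs)]
      rw [pvMerge_replicate (c + 1) v (x :: t) (by simpa using fun he => hvx he.symm)]
      simp only [expandAll, List.reverse_cons, List.flatMap_append]
      simp [expandRun]

-- Python's `result += expandRun(run)` loop equals flatMap
theorem foldl_append_flatMap (runs : List (Int × Nat)) (acc : List Int) :
    runs.foldl (fun acc r => acc ++ expandRun r) acc = acc ++ runs.flatMap expandRun := by
  induction runs generalizing acc with
  | nil => simp
  | cons r t ih => simp [ih, List.append_assoc]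

theorem alt_result_eq_merge (vector : List Int) :
    ((vector.foldl runsStep []).reverse.foldl (fun acc r => acc ++ expandRun r) []) =
      pvMerge vector := by
  rw [foldl_append_flatMap]
  cases vector with
  | nil => simp [pvMerge]
  | cons x t =>
    have := foldl_runsStep_merge t x 0 []
    simp only [expandAll] at this
    simpa [runsStep, List.nil_append, expandAll, pvMerge] using this

-- ===== VERDICT (by name: the statement is the Claim_ definition above) =====
theorem sum_vector_spec : Claim_equal_sum_vector := by
  intro vector reversed _
  show sum_vector vector reversed = sum_vector_alt vector reversed
  unfold sum_vector sum_vector_alt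
  have ha : sumVecLoopA vector 0 [] = pvMerge vector := by
    simpa using sumVecLoopA_eq_merge vector 0 []
  simp only [ha, alt_result_eq_merge]
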